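-- pv_equiv track=rewrite | github.com/ramizik/stealthD | analytics/simple_player_ball_assigner.py | get_player_touch_frames
-- ===== SOURCE A (Python) =====
-- from typing import Dict
--
-- def get_player_touch_frames(ball_assignments: Dict[int, int]) -> Dict[int, list]:
--     """
--     Get list of frames where each player touched the ball.
--
--     Args:
--         ball_assignments: Dictionary {frame_idx: player_id}
--
--     Returns:
--         Dictionary {player_id: [frame_idx1, frame_idx2, ...]}
--     """
--     touch_frames = {}
--     prev_player = None
--
--     sorted_frames = sorted(ball_assignments.keys())
--
--     for frame_idx in sorted_frames:
--         current_player = ball_assignments[frame_idx]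
--
--         if current_player != prev_player and current_player is not None:
--             if current_player not in touch_frames:
--                 touch_frames[current_player] = []
--             touch_frames[current_player].append(int(frame_idx))
--
--         prev_player = current_player
--
--     return touch_frames
-- ===== SOURCE B (Python) =====
-- from typing import Dict
--
--
-- def get_player_touch_frames(ball_assignments: Dict[int, int]) -> Dict[int, list]:
--     """Invert the map into player -> all of that player's assigned frames, then
--     keep, per player, only the frames whose predecessor frame (by position in
--     the sorted key list) is not assigned to that same player."""
--     keys = sorted(ball_assignments)
--     pos = {f: i for i, f in enumerate(keys)}
--     frames_of = {}
--     for f in keys: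
--         p = ball_assignments[f]
--         if p is not None:
--             frames_of.setdefault(p, []).append(f)
--     return {p: [int(f) for f in fs
--                 if pos[f] == 0 or ball_assignments[keys[pos[f] - 1]] != p]
--             for p, fs in frames_of.items()}
-- ===== Notes on version B (the rewrite author's own statement) =====
-- stated objective: alternative
-- what changed: Replaced A's single-pass prev_player state machine over sorted keys with a two-stage inverted index: first group every non-None assignment into a player -> frames dict, then filter each player's frame list by a positional predecessor lookup (pos map + keys[pos[f]-1]) to keep only touch-start frames.
import Mathlib
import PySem

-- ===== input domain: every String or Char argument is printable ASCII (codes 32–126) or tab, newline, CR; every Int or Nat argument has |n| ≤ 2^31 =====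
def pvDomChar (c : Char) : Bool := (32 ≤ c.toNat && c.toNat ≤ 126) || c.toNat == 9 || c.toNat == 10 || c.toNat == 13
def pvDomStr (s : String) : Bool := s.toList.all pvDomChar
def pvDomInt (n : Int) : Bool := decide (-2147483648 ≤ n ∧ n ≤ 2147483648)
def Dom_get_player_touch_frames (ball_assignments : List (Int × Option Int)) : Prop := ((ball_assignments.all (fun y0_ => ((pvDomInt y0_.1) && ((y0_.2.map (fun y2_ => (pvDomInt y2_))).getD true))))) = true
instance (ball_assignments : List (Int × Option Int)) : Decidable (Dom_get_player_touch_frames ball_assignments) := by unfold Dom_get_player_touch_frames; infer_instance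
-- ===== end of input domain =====

-- B replaces A's prev_player state machine with a two-stage inverted index: group every
-- assigned frame per player first, then filter each player's frames by a positional
-- predecessor lookup; alternative decomposition, same O(n log n) cost.


-- ===== PORT A =====
-- A's loop body: `current_player = ball_assignments[frame_idx]` is `getD … none` — exact here
-- because frame_idx is drawn from the dict's keys, so the KeyError branch is unreachable.
def pvAStep (d : PySem.Dict Int (Option Int))
    (st : PySem.Dict Int (List Int) × Option Int) (frame_idx : Int) :
    PySem.Dict Int (List Int) × Option Int :=
  let current_player := d.getD frame_idx none
  let touch_frames :=
    if current_player ≠ st.2 ∧ current_player ≠ none then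
      let p := current_player.getD 0      -- guard guarantees current_player = some p
      let tf := if st.1.contains p = false then st.1.insert p [] else st.1
      tf.modify p [] (fun l => l ++ [frame_idx])
    else st.1
  (touch_frames, current_player)

def get_player_touch_frames (ball_assignments : List (Int × Option Int)) : List (Int × List Int) :=
  let d := PySem.Dict.ofList ball_assignments
  let sorted_frames := PySem.List.sorted d.keys (fun k => k) false
  (sorted_frames.foldl (pvAStep d) (PySem.Dict.empty, none)).1.items

-- ===== PORT B =====
-- frames_of loop body: `p = ball_assignments[f]` is `getD … none` — exact, f comes from the keys.
def pvBStep (d : PySem.Dict Int (Option Int))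
    (fo : PySem.Dict Int (List Int)) (f : Int) : PySem.Dict Int (List Int) :=
  match d.getD f none with
  | some p => (fo.setdefault p []).modify p [] (fun l => l ++ [f])
  | none => fo

-- the final dict comprehension: frames_of has distinct keys, so the built dict's items are
-- this map; `pos[f]` and `keys[pos[f]-1]` are always present/in range when evaluated (f is a
-- key, and pos[f] > 0 by short-circuit), so `.getD` marks the unreachable KeyError/IndexError
-- branches of the Python.
def get_player_touch_frames_alt (ball_assignments : List (Int × Option Int)) : List (Int × List Int) :=
  let d := PySem.Dict.ofList ball_assignments
  let keys := PySem.List.sorted d.keys (fun k => k) false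
  let pos := PySem.Dict.ofList ((PySem.List.enumerate keys).map (fun q => (q.2, q.1)))
  let frames_of := keys.foldl (pvBStep d) PySem.Dict.empty
  frames_of.items.map (fun pf =>
    (pf.1, pf.2.filter (fun f =>
      pos.getD f 0 == 0 ||
        !(d.getD ((PySem.List.pyGet? keys (pos.getD f 0 - 1)).getD 0) none == some pf.1))))

-- ===== PRECONDITION & SPEC =====
def Spec_get_player_touch_frames (ball_assignments : List (Int × Option Int)) (out : List (Int × List Int)) : Prop := out = get_player_touch_frames_alt ball_assignments
instance (ball_assignments : List (Int × Option Int)) (out : List (Int × List Int)) : Decidable (Spec_get_player_touch_frames ball_assignments out) := by unfold Spec_get_player_touch_frames; infer_instance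

-- ===== CLAIM (what is proved, stated in full; the proofs are below) =====
def Claim_equal_get_player_touch_frames : Prop := ∀ (ball_assignments : List (Int × Option Int)), Dom_get_player_touch_frames ball_assignments → Spec_get_player_touch_frames ball_assignments (get_player_touch_frames ball_assignments)

-- ===== LEMMAS AND PROOFS =====

-- A's step rewritten to consume a (frame, player) pair directly instead of a dict lookup.
def pvStep' (st : PySem.Dict Int (List Int) × Option Int) (x : Int × Option Int) :
    PySem.Dict Int (List Int) × Option Int :=
  let touch_frames :=
    if x.2 ≠ st.2 ∧ x.2 ≠ none then
      let p := x.2.getD 0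
      let tf := if st.1.contains p = false then st.1.insert p [] else st.1
      tf.modify p [] (fun l => l ++ [x.1])
    else st.1
  (touch_frames, x.2)

-- B's frames_of step on a (frame, player) pair.
def pvBStep' (fo : PySem.Dict Int (List Int)) (x : Int × Option Int) :
    PySem.Dict Int (List Int) :=
  match x.2 with
  | some p => (fo.setdefault p []).modify p [] (fun l => l ++ [x.1])
  | none => fo

-- (player, frame) pairs that start a touch, given the incoming prev_player
def pvStarts (prev : Option Int) : List (Int × Option Int) → List (Int × Int)
  | [] => []
  | x :: xs => (if x.2 ≠ prev ∧ x.2 ≠ none then [(x.2.getD 0, x.1)] else []) ++ pvStarts x.2 xs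

-- all (player, frame) pairs with a non-None player
def pvAll (l : List (Int × Option Int)) : List (Int × Int) :=
  l.filterMap (fun x => x.2.map (fun p => (p, x.1)))

-- "c p f decides exactly `player ≠ previous player`" along the chain of the list
def pvChainOK (c : Int → Int → Bool) : Option Int → List (Int × Option Int) → Prop
  | _, [] => True
  | prev, x :: xs => (∀ p, x.2 = some p → c p x.1 = decide (x.2 ≠ prev)) ∧ pvChainOK c x.2 xs

theorem pvAll_cons (f : Int) (w : Option Int) (xs : List (Int × Option Int)) :
    pvAll ((f, w) :: xs) =
      (match w with | some p => [(p, f)] | none => []) ++ pvAll xs := by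
  cases w <;> rfl

theorem pv_if_modify (d : PySem.Dict Int (List Int)) (p : Int) (g : List Int → List Int) :
    (if d.contains p = false then d.insert p [] else d).modify p [] g = d.modify p [] g := by
  by_cases h : d.contains p = true
  · simp [h]
  · simp only [Bool.not_eq_true] at h
    simp [h, PySem.Dict.modify, PySem.Dict.getD_insert_self, PySem.Dict.insert_insert_self,
      PySem.Dict.getD_of_not_contains d ([] : List Int) h]

theorem pv_setdefault_modify (d : PySem.Dict Int (List Int)) (p : Int) (g : List Int → List Int) :
    (d.setdefault p []).modify p [] g = d.modify p [] g := by
  by_cases h : d.contains p = true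
  · rw [PySem.Dict.setdefault_of_contains d ([] : List Int) h]
  · simp only [Bool.not_eq_true] at h
    rw [PySem.Dict.setdefault_of_not_contains d ([] : List Int) h]
    simpa [h] using pv_if_modify d p g

-- A's fold is the grouping fold over the touch-start pairs
theorem pvA_foldl (l : List (Int × Option Int)) :
    ∀ (tf : PySem.Dict Int (List Int)) (prev : Option Int),
    (l.foldl pvStep' (tf, prev)).1 =
      (pvStarts prev l).foldl (fun tf x => tf.modify x.1 [] (fun t => t ++ [x.2])) tf := by
  induction l with
  | nil => intro tf prev; rfl
  | cons x xs ih =>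
    intro tf prev
    rw [List.foldl_cons]
    have hstep : pvStep' (tf, prev) x = ((pvStep' (tf, prev) x).1, x.2) := rfl
    rw [hstep, ih]
    by_cases h : x.2 ≠ prev ∧ x.2 ≠ none
    · simp [pvStarts, h, pvStep', pv_if_modify]
    · simp [pvStarts, h, pvStep']

-- B's frames_of fold is the grouping fold over all assigned pairs
theorem pvB_foldl (l : List (Int × Option Int)) : ∀ (fo : PySem.Dict Int (List Int)),
    l.foldl pvBStep' fo =
      (pvAll l).foldl (fun tf x => tf.modify x.1 [] (fun t => t ++ [x.2])) fo := by
  induction l with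
  | nil => intro fo; rfl
  | cons x xs ih =>
    intro fo
    obtain ⟨f, w⟩ := x
    cases w with
    | none => simpa [pvAll_cons, pvBStep'] using ih fo
    | some p => simp [pvAll_cons, pvBStep', ih, pv_setdefault_modify]

-- per-player values: the touch-start frames are the assigned frames that pass c
theorem pvV (c : Int → Int → Bool) (l : List (Int × Option Int)) : ∀ (prev : Option Int),
    pvChainOK c prev l → ∀ (p : Int),
    ((pvStarts prev l).filter (fun y => y.1 == p)).map (fun x => x.2)
      = (((pvAll l).filter (fun y => y.1 == p)).map (fun x => x.2)).filter (c p) := by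
  induction l with
  | nil => intro prev _ p; rfl
  | cons x xs ih =>
    intro prev hchain p
    obtain ⟨f, w⟩ := x
    obtain ⟨hhead, htail⟩ := hchain
    cases w with
    | none => simpa [pvStarts, pvAll_cons] using ih none htail p
    | some q =>
      have hc : c q f = decide ((some q : Option Int) ≠ prev) := hhead q rfl
      have ihq := ih (some q) htail p
      by_cases hp : (some q : Option Int) = prev
      · subst hp
        have hc' : c q f = false := by simpa using hc
        by_cases hq : q = p
        · subst hq; simp [pvStarts, pvAll_cons, ihq, hc']
        · simp [pvStarts, pvAll_cons, hq, ihq]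
      · have hc' : c q f = true := by simpa [hp] using hc
        by_cases hq : q = p
        · subst hq; simp [pvStarts, pvAll_cons, hp, ihq, hc']
        · simp [pvStarts, pvAll_cons, hp, hq, ihq]

-- key order: first-touch order equals first-assignment order
theorem pvK (c : Int → Int → Bool) (l : List (Int × Option Int)) :
    ∀ (prev : Option Int) (acc : List Int),
    pvChainOK c prev l → (∀ q, prev = some q → q ∈ acc) →
    PySem.Set.update acc ((pvStarts prev l).map (fun x => x.1))
      = PySem.Set.update acc ((pvAll l).map (fun x => x.1)) := by
  induction l with
  | nil => intro prev acc _ _; rfl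
  | cons x xs ih =>
    intro prev acc hchain hprev
    obtain ⟨f, w⟩ := x
    obtain ⟨_, htail⟩ := hchain
    cases w with
    | none =>
      simpa [pvStarts, pvAll_cons] using ih none acc htail (by intro q h; exact nomatch h)
    | some q =>
      by_cases hp : (some q : Option Int) = prev
      · subst hp
        have hqacc : q ∈ acc := hprev q rfl
        simpa [pvStarts, pvAll_cons, PySem.Set.update_cons, PySem.Set.add_of_mem hqacc] using
          ih (some q) acc htail
            (by intro r hr; injection hr with h; subst h; exact hqacc)
      · simpa [pvStarts, pvAll_cons, hp, PySem.Set.update_cons] using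
          ih (some q) (PySem.Set.add acc q) htail
            (by intro r hr; injection hr with h; subst h
                exact (PySem.Set.mem_add acc q q).mpr (Or.inr rfl))

-- elementwise (indexed) form of the chain condition
theorem pvChain_of_getElem (c : Int → Int → Bool) (l : List (Int × Option Int)) :
    ∀ (prev : Option Int),
    (∀ (i : Nat) (f p : Int), l[i]? = some (f, some p) →
       c p f = decide ((some p : Option Int) ≠
         (if i = 0 then prev else ((l[i-1]?).map (fun x => x.2)).getD none))) →
    pvChainOK c prev l := by
  induction l with
  | nil => intro prev _; trivial
  | cons x xs ih =>
    intro prev H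
    refine ⟨?_, ?_⟩
    · intro p hp
      have hx : (x :: xs)[0]? = some (x.1, some p) := by simp [← hp]
      have := H 0 x.1 p hx
      simpa [hp] using this
    · apply ih
      intro j f p hj
      have := H (j + 1) f p (by simpa using hj)
      cases j with
      | zero => simpa using this
      | succ j' => simpa using this

-- lookup in the {frame: index} dict built from enumerate
theorem pvPosLookup (k : List Int) (hnd : k.Nodup) (i : Nat) (f : Int) (h : k[i]? = some f) :
    (PySem.Dict.ofList ((PySem.List.enumerate k).map (fun q => (q.2, q.1)))).getD f 0
      = (i : Int) := by
  obtain ⟨hlt, hf⟩ := List.getElem?_eq_some_iff.mp h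
  have hfst : (((PySem.List.enumerate k).map (fun q => (q.2, q.1))).map (fun x => x.1)) = k := by
    rw [List.map_map]
    exact PySem.List.map_snd_enumerate k 0
  have hitems : (PySem.Dict.ofList ((PySem.List.enumerate k).map (fun q => (q.2, q.1)))).items
      = (PySem.List.enumerate k).map (fun q => (q.2, q.1)) := by
    have hfresh := PySem.Dict.items_foldl_insert_fresh
      ((PySem.List.enumerate k).map (fun q => (q.2, q.1)))
      (fun a => a.1) (fun a => a.2) PySem.Dict.empty
      (by intro a _; exact PySem.Dict.contains_empty a.1)
      (by rw [hfst]; exact hnd)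
    simpa [PySem.Dict.ofList, PySem.Dict.update] using hfresh
  have hmem : (f, (i : Int)) ∈
      (PySem.Dict.ofList ((PySem.List.enumerate k).map (fun q => (q.2, q.1)))).items := by
    rw [hitems]
    refine List.mem_map.mpr ⟨((i : Int), f), ?_, rfl⟩
    exact (PySem.List.mem_enumerate_iff k 0 _).mpr ⟨i, hlt, by simp [hf]⟩
  exact PySem.Dict.getD_of_mem_items _ hmem (PySem.Dict.nodup_keys_ofList _) 0

-- the sorted key list is the first components of the sorted items
theorem pvKeysEq (d : PySem.Dict Int (Option Int)) (hnd : d.keys.Nodup) :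
    PySem.List.sorted d.keys (fun x => x) false
      = (PySem.List.sorted d.items (fun kv => kv.1) false).map (fun x => x.1) := by
  set s := PySem.List.sorted d.items (fun kv => kv.1) false with hs
  have hperm : s.Perm d.items := PySem.List.sorted_perm d.items (fun kv => kv.1) false
  have hmapfst : (s.map (fun x => x.1)).Perm d.keys := hperm.map (fun x => x.1)
  have hnodup : (s.map (fun x => x.1)).Nodup := hmapfst.nodup_iff.mpr hnd
  have hpw_le : s.Pairwise (fun a b => a.1 ≤ b.1) :=
    PySem.List.sorted_pairwise d.items (fun kv => kv.1)
  have hpwlt : (s.map (fun x => x.1)).Pairwise (· < ·) := by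
    have h1 : (s.map (fun x => x.1)).Pairwise (· ≤ ·) := List.pairwise_map.mpr hpw_le
    have h2 : (s.map (fun x => x.1)).Pairwise (· ≠ ·) := hnodup
    exact (h1.and h2).imp (fun h => lt_of_le_of_ne h.1 h.2)
  exact PySem.List.sorted_eq_of_perm_of_pairwise_lt d.keys (s.map (fun x => x.1)) (fun x => x)
    hmapfst hpwlt

-- sorted keys, paired with their looked-up values, are exactly the sorted items
theorem pvSortedKeys (d : PySem.Dict Int (Option Int)) (hnd : d.keys.Nodup) :
    (PySem.List.sorted d.keys (fun k => k) false).map (fun f => (f, d.getD f none)) =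
      PySem.List.sorted d.items (fun kv => kv.1) false := by
  set s := PySem.List.sorted d.items (fun kv => kv.1) false with hs
  rw [pvKeysEq d hnd, List.map_map]
  have hfix : ∀ kv ∈ s, ((fun f => (f, d.getD f none)) ∘ (fun x => x.1)) kv = id kv := by
    intro kv hkv
    have hmem : kv ∈ d.items := (PySem.List.mem_sorted _ _ _ _).mp hkv
    have hget : d.getD kv.1 none = kv.2 :=
      PySem.Dict.getD_of_mem_items d (show (kv.1, kv.2) ∈ d.items from hmem) hnd none
    simp [hget]
  rw [List.map_congr_left hfix, List.map_id]

-- the chain condition holds for B's concrete positional-predecessor test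
theorem pvChainConcrete (d : PySem.Dict Int (Option Int)) (hnd : d.keys.Nodup) :
    pvChainOK (fun p f =>
      (PySem.Dict.ofList ((PySem.List.enumerate (PySem.List.sorted d.keys (fun k => k) false)).map
          (fun q => (q.2, q.1)))).getD f 0 == 0 ||
      !(d.getD ((PySem.List.pyGet? (PySem.List.sorted d.keys (fun k => k) false)
          ((PySem.Dict.ofList ((PySem.List.enumerate (PySem.List.sorted d.keys (fun k => k) false)).map
            (fun q => (q.2, q.1)))).getD f 0 - 1)).getD 0) none == some p))
      none (PySem.List.sorted d.items (fun kv => kv.1) false) := by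
  set s := PySem.List.sorted d.items (fun kv => kv.1) false with hs
  set ks := PySem.List.sorted d.keys (fun k => k) false with hks
  have hkeq : ks = s.map (fun x => x.1) := pvKeysEq d hnd
  have hndks : ks.Nodup :=
    ((PySem.List.sorted_perm d.keys (fun k => k) false).nodup_iff).mpr hnd
  apply pvChain_of_getElem
  intro i f p hi
  obtain ⟨hilt, hsi⟩ := List.getElem?_eq_some_iff.mp hi
  have hki : ks[i]? = some f := by
    rw [hkeq]
    simp [List.getElem?_map, List.getElem?_eq_getElem hilt, hsi]
  have hpos := pvPosLookup ks hndks i f hki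
  cases i with
  | zero => simp [hpos]
  | succ j =>
    have hjlt : j < s.length := Nat.lt_of_succ_lt hilt
    have hne0 : ((j + 1 : Nat) : Int) ≠ 0 := by exact_mod_cast Nat.succ_ne_zero j
    have hcast : ((j + 1 : Nat) : Int) - 1 = ((j : Nat) : Int) := by push_cast; ring
    have hkj : ks[j]? = some ((s[j]'hjlt).1) := by
      rw [hkeq]
      simp [List.getElem?_map, List.getElem?_eq_getElem hjlt]
    have hmemj : ((s[j]'hjlt).1, (s[j]'hjlt).2) ∈ d.items := by
      have : s[j]'hjlt ∈ d.items :=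
        (PySem.List.mem_sorted _ _ _ _).mp (List.getElem_mem hjlt)
      simpa using this
    have hgd : d.getD ((s[j]'hjlt).1) none = (s[j]'hjlt).2 :=
      PySem.Dict.getD_of_mem_items d hmemj hnd none
    have hpy : PySem.List.pyGet? ks ((j : Nat) : Int) = some ((s[j]'hjlt).1) := by
      rw [PySem.List.pyGet?_natCast]; exact hkj
    simp only [hpos, hcast, hpy, Option.getD_some, hgd,
      List.getElem?_eq_getElem hjlt, Nat.add_sub_cancel, if_neg (Nat.succ_ne_zero j),
      Option.map_some]
    have hb : ((((j + 1 : Nat) : Int)) == (0 : Int)) = false := by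
      simp only [beq_eq_false_iff_ne, ne_eq]
      exact hne0
    rw [hb]
    by_cases hqe : (s[j]'hjlt).2 = some p
    · simp [hqe]
    · have h1 : ¬ (some p = (s[j]'hjlt).2) := fun h => hqe h.symm
      simp [hqe, h1]

-- ===== VERDICT (by name: the statement is the Claim_ definition above) =====
theorem get_player_touch_frames_spec : Claim_equal_get_player_touch_frames := by
  intro ba _
  unfold Spec_get_player_touch_frames get_player_touch_frames get_player_touch_frames_alt
  dsimp only
  have hnd : (PySem.Dict.ofList ba).keys.Nodup := PySem.Dict.nodup_keys_ofList ba
  have hchain := pvChainConcrete (PySem.Dict.ofList ba) hnd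
  set d := PySem.Dict.ofList ba with hd
  set s := PySem.List.sorted d.items (fun kv => kv.1) false with hs
  set ks := PySem.List.sorted d.keys (fun k => k) false with hks
  set pos := PySem.Dict.ofList ((PySem.List.enumerate ks).map (fun q => (q.2, q.1))) with hpo
  have hsk : ks.map (fun f => (f, d.getD f none)) = s := pvSortedKeys d hnd
  -- A's fold over sorted keys = fold of pvStep' over the sorted items
  rw [show pvAStep d = (fun st f => pvStep' st (f, d.getD f none)) from rfl]
  rw [show pvBStep d = (fun fo f => pvBStep' fo (f, d.getD f none)) from rfl]
  have hA2 : ks.foldl (fun st f => pvStep' st (f, d.getD f none)) (PySem.Dict.empty, none)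
      = (ks.map (fun f => (f, d.getD f none))).foldl pvStep' (PySem.Dict.empty, none) :=
    (List.foldl_map).symm
  have hB2 : ks.foldl (fun fo f => pvBStep' fo (f, d.getD f none)) PySem.Dict.empty
      = (ks.map (fun f => (f, d.getD f none))).foldl pvBStep' PySem.Dict.empty :=
    (List.foldl_map).symm
  rw [hA2, hB2, hsk, pvA_foldl s PySem.Dict.empty none, pvB_foldl s PySem.Dict.empty]
  -- items of the two grouping folds
  have hndSA : ((pvStarts none s).foldl
      (fun tf x => tf.modify x.1 [] (fun t => t ++ [x.2])) PySem.Dict.empty).keys.Nodup := by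
    have := PySem.Dict.nodup_keys_foldl_modify_key (pvStarts none s) (fun x => x.1)
      ([] : List Int) (fun _ x => fun t => t ++ [x.2]) PySem.Dict.empty
      (by simp [PySem.Dict.keys_empty])
    simpa using this
  have hndFB : ((pvAll s).foldl
      (fun tf x => tf.modify x.1 [] (fun t => t ++ [x.2])) PySem.Dict.empty).keys.Nodup := by
    have := PySem.Dict.nodup_keys_foldl_modify_key (pvAll s) (fun x => x.1)
      ([] : List Int) (fun _ x => fun t => t ++ [x.2]) PySem.Dict.empty
      (by simp [PySem.Dict.keys_empty])
    simpa using this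
  rw [PySem.Dict.items_eq_map_keys _ hndSA ([] : List Int),
      PySem.Dict.items_eq_map_keys _ hndFB ([] : List Int)]
  have hkeysSA := PySem.Dict.keys_foldl_modify_key (pvStarts none s) (fun x => x.1)
    ([] : List Int) (fun _ x => fun t => t ++ [x.2]) PySem.Dict.empty
  have hkeysFB := PySem.Dict.keys_foldl_modify_key (pvAll s) (fun x => x.1)
    ([] : List Int) (fun _ x => fun t => t ++ [x.2]) PySem.Dict.empty
  rw [PySem.Dict.keys_empty] at hkeysSA hkeysFB
  rw [hkeysSA, hkeysFB]
  have hgetSA : ∀ p : Int, ((pvStarts none s).foldl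
      (fun tf x => tf.modify x.1 [] (fun t => t ++ [x.2])) PySem.Dict.empty).getD p []
      = ((pvStarts none s).filter (fun y => y.1 == p)).map (fun x => x.2) := by
    intro p
    simpa [PySem.Dict.getD_empty] using
      PySem.Dict.getD_foldl_modify_append (pvStarts none s) PySem.Dict.empty p
  have hgetFB : ∀ p : Int, ((pvAll s).foldl
      (fun tf x => tf.modify x.1 [] (fun t => t ++ [x.2])) PySem.Dict.empty).getD p []
      = ((pvAll s).filter (fun y => y.1 == p)).map (fun x => x.2) := by
    intro p
    simpa [PySem.Dict.getD_empty] using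
      PySem.Dict.getD_foldl_modify_append (pvAll s) PySem.Dict.empty p
  simp only [hgetSA, hgetFB, List.map_map]
  -- same key order
  rw [pvK _ s none [] hchain (by intro q h; exact nomatch h)]
  -- same value per key
  refine List.map_congr_left (fun p _ => ?_)
  dsimp only
  rw [pvV _ s none hchain p]
  rfl
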